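-- pv_equiv track=rewrite | github.com/PabloRuizCuevas/probability-sorting | sort_analyzer.py | placeit
-- ===== SOURCE A (Python) =====
-- def placeit(slots, idx, ni, direction=None):
--     if idx+direction in [-1, len(slots)]:
--         direction=-direction
--
--     if slots[idx] != 0:
--         slots = placeit(slots, idx+direction, ni, direction)
--     else:
--         slots[idx] = ni
--     return slots
-- ===== SOURCE B (Python) =====
-- # Closed-form reflected-walk search instead of A's recursive bounce walk.
-- # Mutates slots in place (one write), like A.
--
-- def _pos(n, start, direction, k):
--     period = max(2 * (n - 1), 1)
--     t = (start + direction * k) % period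
--     return t if t <= n - 1 else period - t
--
-- def placeit(slots, idx, ni, direction=None):
--     n = len(slots)
--     start = idx + n if idx < 0 else idx
--     for k in range(max(2 * (n - 1), 1)):
--         pos = _pos(n, start, direction, k)
--         if slots[pos] == 0:
--             slots[pos] = ni
--             return slots
--     raise ValueError("no empty slot")
-- ===== Notes on version B (the rewrite author's own statement) =====
-- stated objective: alternative
-- what changed: Replaces A's recursive bounce walk (idx and a flipping direction threaded through recursive calls) by a single loop over step counts whose visited slot is computed in closed form as a triangular-wave reflection of start + direction*k modulo the period 2*(len-1).
-- outside the precondition, e.g. on placeit([0, 0, 1], -1, 5, 1): A returns [5, 0, 1], B returns [0, 5, 1]; on placeit([1, 1, 0], 1, 9, 2): A returns [1, 1, 9], B raises ValueError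
import Mathlib
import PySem

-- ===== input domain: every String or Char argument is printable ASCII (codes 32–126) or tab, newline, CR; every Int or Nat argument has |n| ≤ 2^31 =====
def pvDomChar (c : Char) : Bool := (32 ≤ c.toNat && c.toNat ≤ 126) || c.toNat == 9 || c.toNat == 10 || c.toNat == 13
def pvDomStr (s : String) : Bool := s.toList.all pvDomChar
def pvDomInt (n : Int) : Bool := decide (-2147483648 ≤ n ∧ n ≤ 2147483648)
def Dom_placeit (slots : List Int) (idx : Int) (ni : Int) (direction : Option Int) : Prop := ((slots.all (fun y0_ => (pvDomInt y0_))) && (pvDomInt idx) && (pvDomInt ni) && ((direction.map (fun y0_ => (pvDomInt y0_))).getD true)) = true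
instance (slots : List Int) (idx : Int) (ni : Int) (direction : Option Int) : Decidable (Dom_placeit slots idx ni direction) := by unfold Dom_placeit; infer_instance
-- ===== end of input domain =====

-- B replaces A's recursive bounce walk by a closed-form reflected-index search; equivalence is about
-- the return value (both Pythons write the placed value into `slots` in place).

-- ===== PORT A =====
-- A's recursion terminates on every input admitted by Pre_ within 2*len+2 calls (the walk visits every
-- slot within one reflection period); the fuel parameter only makes the transliteration total.
def placeitA : Nat → List Int → Int → Int → Int → List Int
  | 0, slots, _, _, _ => slots          -- fuel exhausted: unreachable under Pre_placeit
  | f+1, slots, idx, ni, d =>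
    -- if idx+direction in [-1, len(slots)]: direction = -direction
    let d' := if idx + d = -1 ∨ idx + d = (slots.length : Int) then -d else d
    match PySem.List.pyGet? slots idx with
    | none => slots                     -- IndexError: unreachable under Pre_placeit
    | some v =>
      if v ≠ 0 then placeitA f slots (idx + d') ni d'
      else PySem.List.pySetD slots idx ni   -- slots[idx] = ni (in range whenever pyGet? succeeded)

def placeit (slots : List Int) (idx : Int) (ni : Int) (direction : Option Int) : List Int :=
  match direction with
  | none => slots                       -- direction=None: idx+None raises TypeError, excluded by Pre_placeit
  | some d => placeitA (2 * slots.length + 2) slots idx ni d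

-- ===== PORT B =====
-- _pos(n, start, direction, k) of Source B
def rpos (n start direction : Int) (k : Nat) : Int :=
  let period := max (2 * (n - 1)) 1
  let t := PySem.Int.mod (start + direction * (k : Int)) period
  if t ≤ n - 1 then t else period - t

-- the `for k in range(...)` loop of Source B: k is the current loop counter, the Nat argument the remaining count
def findK (slots : List Int) (start d : Int) (k : Nat) : Nat → Option Int
  | 0 => none
  | c+1 =>
    let pos := rpos (slots.length : Int) start d k
    match PySem.List.pyGet? slots pos with
    | none => none                      -- IndexError: unreachable under Pre_placeit
    | some v => if v = 0 then some pos else findK slots start d (k+1) c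

def placeit_alt (slots : List Int) (idx : Int) (ni : Int) (direction : Option Int) : List Int :=
  match direction with
  | none => slots                       -- direction*k raises TypeError in Source B too; excluded by Pre_placeit
  | some d =>
    let n : Int := slots.length
    let start := if idx < 0 then idx + n else idx
    match findK slots start d 0 (max (2 * (n - 1)) 1).toNat with
    | some pos => PySem.List.pySetD slots pos ni
    | none => slots                   -- Source B raises ValueError here; excluded by Pre_placeit

-- ===== PRECONDITION & SPEC =====
-- Pre_ admits the inputs where A returns and its walk is the bouncing search B implements: an immediate
-- hit at slots[idx] (any direction), a full walk from a non-negative idx with direction ±1 and an empty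
-- slot present, and the negative-idx walks that find an empty slot before A's raw-index arithmetic
-- diverges from Python's wraparound indexing (descending with -1; ascending with +1 before the top edge).
-- Excluded: direction=None (TypeError), idx out of [-len, len) (IndexError), no reachable empty slot
-- (A recurses forever: RecursionError/IndexError), and the remaining negative-idx / |direction|≠1 walks,
-- where A's bounce test uses the raw index while slots[idx] wraps, so its path teleports — an accident
-- of A's implementation that A's own author could not have intended (see the cited examples).
def Pre_placeit (slots : List Int) (idx : Int) (ni : Int) (direction : Option Int) : Prop :=
  (direction ≠ none ∧ -(slots.length : Int) ≤ idx ∧ idx < (slots.length : Int) ∧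
    PySem.List.pyGet? slots idx = some 0) ∨
  ((direction = some 1 ∨ direction = some (-1)) ∧ 0 ≤ idx ∧ idx < (slots.length : Int) ∧
    (0 : Int) ∈ slots) ∨
  (direction = some (-1) ∧ -(slots.length : Int) ≤ idx ∧ idx < 0 ∧
    (0 : Int) ∈ slots.take ((idx + (slots.length : Int) + 1).toNat)) ∨
  (direction = some 1 ∧ -(slots.length : Int) ≤ idx ∧ idx < 0 ∧
    (0 : Int) ∈ (slots.take (slots.length - 1)).drop ((idx + (slots.length : Int)).toNat))
instance (slots : List Int) (idx : Int) (ni : Int) (direction : Option Int) : Decidable (Pre_placeit slots idx ni direction) := by unfold Pre_placeit; infer_instance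

def pvWitness_placeit : List Int × Int × Int × Option Int := ([3, 0, 1], 0, 7, some 1)

def Spec_placeit (slots : List Int) (idx : Int) (ni : Int) (direction : Option Int) (out : List Int) : Prop := out = placeit_alt slots idx ni direction
instance (slots : List Int) (idx : Int) (ni : Int) (direction : Option Int) (out : List Int) : Decidable (Spec_placeit slots idx ni direction out) := by unfold Spec_placeit; infer_instance

-- ===== CLAIM (what is proved, stated in full; the proofs are below) =====
def Claim_equal_placeit : Prop := ∀ (slots : List Int) (idx : Int) (ni : Int) (direction : Option Int), Dom_placeit slots idx ni direction → Pre_placeit slots idx ni direction → Spec_placeit slots idx ni direction (placeit slots idx ni direction)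

-- ===== LEMMAS AND PROOFS =====

def rposM (n m : Int) : Int :=
  let period := max (2 * (n - 1)) 1
  let t := PySem.Int.mod m period
  if t ≤ n - 1 then t else period - t

theorem perP_pos (n : Int) : 0 < max (2 * (n - 1)) 1 := lt_of_lt_of_le one_pos (le_max_right _ _)

theorem rposM_emod (n m : Int) :
    rposM n m = (if m % (max (2 * (n - 1)) 1) ≤ n - 1 then m % (max (2 * (n - 1)) 1)
                 else (max (2 * (n - 1)) 1) - m % (max (2 * (n - 1)) 1)) := by
  simp only [rposM, PySem.Int.mod_eq_emod_of_pos (perP_pos n)]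

theorem rposM_neg (n m : Int) : rposM n (-m) = rposM n m := by
  have hP := perP_pos n
  have hPc := max_choice (2 * (n - 1)) (1 : Int)
  set P := max (2 * (n - 1)) 1 with hPdef
  have ht0 : 0 ≤ m % P := Int.emod_nonneg m (ne_of_gt hP)
  have ht1 : m % P < P := Int.emod_lt_of_pos m hP
  have hneg : (-m) % P = (P - m % P) % P := by
    conv_lhs => rw [show -m = -(m % P) + (-(m / P)) * P by linear_combination Int.emod_add_mul_ediv m P]
    rw [Int.add_mul_emod_self_right, show -(m % P) = (P - m % P) + (-1) * P by ring,
      Int.add_mul_emod_self_right]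
  rw [rposM_emod, rposM_emod, ← hPdef, hneg]
  by_cases h0 : m % P = 0
  · simp [h0]
  · rw [Int.emod_eq_of_lt (by omega) (by omega)]
    split_ifs <;> omega

theorem rposM_id {n p : Int} (h0 : 0 ≤ p) (h1 : p < n) : rposM n p = p := by
  have hPc := max_choice (2 * (n - 1)) (1 : Int)
  rw [rposM_emod, Int.emod_eq_of_lt h0 (by omega)]
  have : p ≤ n - 1 := by omega
  simp [this]

theorem rposM_congr {n m1 m2 : Int} (h : m1 % (max (2 * (n - 1)) 1) = m2 % (max (2 * (n - 1)) 1)) :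
    rposM n m1 = rposM n m2 := by
  rw [rposM_emod, rposM_emod, h]

theorem rposM_period (n m : Int) : rposM n (m + max (2 * (n - 1)) 1) = rposM n m := by
  exact rposM_congr (by rw [show m + max (2 * (n - 1)) 1 = m + (max (2 * (n - 1)) 1) * 1 by ring,
    Int.add_mul_emod_self_left])

theorem rposM_shift {n p d d' : Int} (hn : 2 ≤ n) (hd : d = 1 ∨ d = -1)
    (hp0 : 0 ≤ p) (hpn : p < n)
    (hd' : d' = if p + d = -1 ∨ p + d = n then -d else d) (k : Nat) :
    rposM n (p + d * ((k : Int) + 1)) = rposM n ((p + d') + d' * (k : Int)) := by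
  have hP2 : max (2 * (n - 1)) 1 = 2 * (n - 1) := max_eq_left (by omega)
  by_cases hb : p + d = -1 ∨ p + d = n
  · rw [if_pos hb] at hd'
    rcases hb with hb | hb
    · have hdm : d = -1 := by rcases hd with h | h <;> omega
      have hp : p = 0 := by omega
      subst hdm hp
      rw [hd']
      rw [show (0 : Int) + -1 * ((k : Int) + 1) = -((k : Int) + 1) by ring, rposM_neg,
        show (0 : Int) + - -1 + - -1 * (k : Int) = (k : Int) + 1 by ring]
    · have hdm : d = 1 := by rcases hd with h | h <;> omega
      have hp : p = n - 1 := by omega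
      subst hdm
      subst hp
      rw [hd']
      have e1 : n - 1 + 1 * ((k : Int) + 1)
          = -((n - 1 + -1 + -1 * (k : Int)) - max (2 * (n - 1)) 1) := by rw [hP2]; ring
      rw [e1, rposM_neg]
      have e2 := rposM_period n ((n - 1 + -1 + -1 * (k : Int)) - max (2 * (n - 1)) 1)
      rw [show ((n - 1 + -1 + -1 * (k : Int)) - max (2 * (n - 1)) 1) + max (2 * (n - 1)) 1
        = n - 1 + -1 + -1 * (k : Int) by ring] at e2
      exact e2.symm
  · rw [if_neg hb] at hd'
    rw [hd', show p + d * ((k : Int) + 1) = p + d + d * (k : Int) by ring]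

theorem rpos_eq_rposM (n s d : Int) (k : Nat) : rpos n s d k = rposM n (s + d * (k : Int)) := rfl

theorem findK_shift {slots : List Int} {p d d' : Int} (hn : 2 ≤ (slots.length : Int))
    (hd : d = 1 ∨ d = -1) (hp0 : 0 ≤ p) (hpn : p < (slots.length : Int))
    (hd' : d' = if p + d = -1 ∨ p + d = (slots.length : Int) then -d else d) :
    ∀ (c k : Nat), findK slots p d (k+1) c = findK slots (p + d') d' k c := by
  intro c
  induction c with
  | zero => intro k; rfl
  | succ c ih =>
    intro k
    have hpos : rpos (slots.length : Int) p d (k+1) = rpos (slots.length : Int) (p + d') d' k := by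
      rw [rpos_eq_rposM, rpos_eq_rposM, Nat.cast_add, Nat.cast_one]
      exact rposM_shift hn hd hp0 hpn hd' k
    show (match PySem.List.pyGet? slots (rpos (slots.length : Int) p d (k+1)) with
      | none => none
      | some v => if v = 0 then some (rpos (slots.length : Int) p d (k+1))
                  else findK slots p d (k+1+1) c) = _
    rw [hpos]
    show _ = (match PySem.List.pyGet? slots (rpos (slots.length : Int) (p + d') d' k) with
      | none => none
      | some v => if v = 0 then some (rpos (slots.length : Int) (p + d') d' k)
                  else findK slots (p + d') d' (k+1) c)
    cases PySem.List.pyGet? slots (rpos (slots.length : Int) (p + d') d' k) with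
    | none => rfl
    | some v =>
      by_cases hv : v = 0
      · simp [hv]
      · simp only [if_neg hv]
        exact ih (k+1)

theorem length_ge_two {slots : List Int} {p v : Int} (hz : (0 : Int) ∈ slots)
    (hget : PySem.List.pyGet? slots p = some v) (hv : v ≠ 0) (hp0 : 0 ≤ p)
    (hpn : p < (slots.length : Int)) : 2 ≤ (slots.length : Int) := by
  obtain ⟨i, hi, hzi⟩ := List.mem_iff_getElem.mp hz
  rw [PySem.List.pyGet?_eq_some_getElem slots hp0 hpn] at hget
  have hplen : p.toNat < slots.length := by omega
  by_contra hcon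
  have h1 : slots.length = 1 := by omega
  have : i = p.toNat := by omega
  subst this
  rw [hzi] at hget
  exact hv (by injection hget; omega)

theorem placeitA_eq_findK (slots : List Int) (ni : Int) (hz : (0 : Int) ∈ slots) :
    ∀ (c : Nat) (p d : Int), (d = 1 ∨ d = -1) → 0 ≤ p → p < (slots.length : Int) →
      placeitA c slots p ni d =
        (match findK slots p d 0 c with
         | some pos => PySem.List.pySetD slots pos ni
         | none => slots) := by
  intro c
  induction c with
  | zero => intro p d _ _ _; rfl
  | succ c ih =>
    intro p d hd hp0 hpn
    have hid : rpos (slots.length : Int) p d 0 = p := by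
      rw [rpos_eq_rposM]
      simpa using rposM_id hp0 hpn
    have hget : PySem.List.pyGet? slots p = some slots[p.toNat] :=
      PySem.List.pyGet?_eq_some_getElem slots hp0 hpn
    show (let d' := if p + d = -1 ∨ p + d = (slots.length : Int) then -d else d
      match PySem.List.pyGet? slots p with
      | none => slots
      | some v => if v ≠ 0 then placeitA c slots (p + d') ni d'
                  else PySem.List.pySetD slots p ni) = _
    conv_rhs => rw [show findK slots p d 0 (c+1) =
      (match PySem.List.pyGet? slots (rpos (slots.length : Int) p d 0) with
       | none => none
       | some v => if v = 0 then some (rpos (slots.length : Int) p d 0)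
                   else findK slots p d 1 c) from rfl]
    rw [hid, hget]
    by_cases hv : slots[p.toNat] = 0
    · simp [hv]
    · simp only [hv, ne_eq, not_false_eq_true, if_pos]
      have hn2 : 2 ≤ (slots.length : Int) := length_ge_two hz hget hv hp0 hpn
      set d' := if p + d = -1 ∨ p + d = (slots.length : Int) then -d else d with hd'
      have hd1 : d' = 1 ∨ d' = -1 := by
        rw [hd']; split_ifs <;> rcases hd with h | h <;> omega
      have hrange : 0 ≤ p + d' ∧ p + d' < (slots.length : Int) := by
        rw [hd']
        by_cases hb : p + d = -1 ∨ p + d = (slots.length : Int)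
        · rw [if_pos hb]
          rcases hb with hb | hb <;> rcases hd with h | h <;> omega
        · rw [if_neg hb]
          have hb1 : p + d ≠ -1 := fun h => hb (Or.inl h)
          have hb2 : p + d ≠ (slots.length : Int) := fun h => hb (Or.inr h)
          rcases hd with h | h <;> omega
      rw [findK_shift hn2 hd hp0 hpn hd' c 0]
      exact ih (p + d') d' hd1 hrange.1 hrange.2

theorem findK_cover (slots : List Int) (hz : (0 : Int) ∈ slots) {p d : Int}
    (hd : d = 1 ∨ d = -1) (_hp0 : 0 ≤ p) (_hpn : p < (slots.length : Int)) :
    ∃ j < (max (2 * ((slots.length : Int) - 1)) 1).toNat,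
      PySem.List.pyGet? slots (rpos (slots.length : Int) p d (0 + j)) = some 0 := by
  set n : Int := (slots.length : Int) with hn
  set P : Int := max (2 * (n - 1)) 1 with hP
  have hPpos : 0 < P := perP_pos n
  obtain ⟨i, hi, hzi⟩ := List.mem_iff_getElem.mp hz
  refine ⟨((d * ((i : Int) - p)) % P).toNat, ?_, ?_⟩
  · have h1 : (d * ((i : Int) - p)) % P < P := Int.emod_lt_of_pos _ hPpos
    omega
  · have hnn : 0 ≤ (d * ((i : Int) - p)) % P := Int.emod_nonneg _ (ne_of_gt hPpos)
    rw [rpos_eq_rposM]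
    have harg : rposM n (p + d * ((0 : Nat) + ((d * ((i : Int) - p)) % P).toNat : Nat))
        = rposM n (i : Int) := by
      apply rposM_congr
      rw [show ((((0 : Nat) + ((d * ((i : Int) - p)) % P).toNat : Nat)) : Int)
        = (d * ((i : Int) - p)) % P by push_cast; omega]
      conv_lhs => rw [Int.add_emod, Int.mul_emod d ((d * ((i : Int) - p)) % P),
        Int.emod_emod_of_dvd _ dvd_rfl, ← Int.mul_emod d (d * ((i : Int) - p)),
        ← Int.add_emod]
      rw [show p + d * (d * ((i : Int) - p)) = (i : Int) + (d * d - 1) * ((i : Int) - p) by ring]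
      rcases hd with h | h <;> simp [h]
    rw [harg, rposM_id (by positivity) (by rw [hn]; exact_mod_cast hi)]
    rw [show ((i : Int)) = ((i : Nat) : Int) from rfl, PySem.List.pyGet?_natCast]
    simp [List.getElem?_eq_getElem hi, hzi]

theorem findK_succ (slots : List Int) (start d : Int) (k c : Nat) :
    findK slots start d k (c+1) =
      (match PySem.List.pyGet? slots (rpos (slots.length : Int) start d k) with
       | none => none
       | some v => if v = 0 then some (rpos (slots.length : Int) start d k)
                   else findK slots start d (k+1) c) := rfl

theorem findK_stable (slots : List Int) (start d : Int) :
    ∀ (c₁ k c₂ : Nat), c₁ ≤ c₂ →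
      (∃ j < c₁, PySem.List.pyGet? slots (rpos (slots.length : Int) start d (k + j)) = some 0) →
      findK slots start d k c₂ = findK slots start d k c₁ := by
  intro c₁
  induction c₁ with
  | zero => intro k c₂ _ h; exact absurd h (by simp)
  | succ c₁ ih =>
    intro k c₂ hle h
    obtain ⟨c₂', rfl⟩ : ∃ c₂', c₂ = c₂' + 1 := ⟨c₂ - 1, by omega⟩
    rw [findK_succ, findK_succ]
    obtain ⟨j, hj, hjz⟩ := h
    cases hget : PySem.List.pyGet? slots (rpos (slots.length : Int) start d k) with
    | none =>
      cases j with
      | zero => rw [Nat.add_zero, hget] at hjz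
      | succ j' => rfl
    | some v =>
      by_cases hv : v = 0
      · simp [hv]
      · simp only [if_neg hv]
        apply ih (k+1) c₂' (by omega)
        cases j with
        | zero =>
          rw [Nat.add_zero] at hjz; rw [hget] at hjz
          exact absurd (by injection hjz) hv
        | succ j' =>
          exact ⟨j', by omega, by rw [show k + 1 + j' = k + (j' + 1) by omega]; exact hjz⟩

theorem pyIdx?_wrap (len : Nat) (i : Int) (h0 : -(len : Int) ≤ i) (h1 : i < 0) :
    PySem.List.pyIdx? len i = PySem.List.pyIdx? len (i + len) := by
  simp only [PySem.List.pyIdx?]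
  split_ifs <;> first | rfl | (congr 1; omega)

theorem mem_take_iff (xs : List Int) (m : Nat) (a : Int) :
    a ∈ xs.take m ↔ ∃ i < m, xs[i]? = some a := by
  rw [List.mem_iff_getElem?]
  constructor
  · rintro ⟨i, h⟩
    rw [List.getElem?_take] at h
    by_cases him : i < m
    · exact ⟨i, him, by simpa [him] using h⟩
    · simp [him] at h
  · rintro ⟨i, him, h⟩
    exact ⟨i, by rw [List.getElem?_take]; simpa [him] using h⟩

theorem mem_drop_take_iff (xs : List Int) (j m : Nat) (a : Int) :
    a ∈ (xs.take m).drop j ↔ ∃ i, j ≤ i ∧ i < m ∧ xs[i]? = some a := by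
  rw [List.mem_iff_getElem?]
  constructor
  · rintro ⟨i, h⟩
    rw [List.getElem?_drop, List.getElem?_take] at h
    by_cases him : j + i < m
    · exact ⟨j + i, by omega, him, by simpa [him] using h⟩
    · simp [him] at h
  · rintro ⟨i, hji, him, h⟩
    refine ⟨i - j, ?_⟩
    rw [List.getElem?_drop, List.getElem?_take, show j + (i - j) = i by omega]
    simpa [him] using h

-- one unfolding step of port A, with the bounce branch written out
theorem placeitA_succ (c : Nat) (slots : List Int) (idx ni d : Int) :
    placeitA (c+1) slots idx ni d =
      (match PySem.List.pyGet? slots idx with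
       | none => slots
       | some v =>
         if v ≠ 0 then
           placeitA c slots
             (idx + (if idx + d = -1 ∨ idx + d = (slots.length : Int) then -d else d)) ni
             (if idx + d = -1 ∨ idx + d = (slots.length : Int) then -d else d)
         else PySem.List.pySetD slots idx ni) := rfl

-- B's loop written with the start of the walk shifted into the evaluated position
theorem pyGet?_wrap (slots : List Int) (i : Int) (h0 : -(slots.length : Int) ≤ i) (h1 : i < 0) :
    PySem.List.pyGet? slots i = PySem.List.pyGet? slots (i + (slots.length : Int)) := by
  rw [PySem.List.pyGet?, PySem.List.pyGet?, pyIdx?_wrap slots.length i h0 h1]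

theorem pySetD_wrap (slots : List Int) (i ni : Int) (h0 : -(slots.length : Int) ≤ i) (h1 : i < 0) :
    PySem.List.pySetD slots i ni = PySem.List.pySetD slots (i + (slots.length : Int)) ni := by
  simp only [PySem.List.pySetD, PySem.List.pySet?, pyIdx?_wrap slots.length i h0 h1]

-- clause C1 of Pre_: the in-range walk with direction ±1 and an empty slot present
theorem main_eq (slots : List Int) (idx ni d : Int) (hd : d = 1 ∨ d = -1)
    (h0 : 0 ≤ idx) (h1 : idx < (slots.length : Int)) (hz : (0 : Int) ∈ slots) :
    placeit slots idx ni (some d) = placeit_alt slots idx ni (some d) := by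
  have hPc := max_choice (2 * ((slots.length : Int) - 1)) (1 : Int)
  have hstart : (if idx < 0 then idx + (slots.length : Int) else idx) = idx := if_neg (by omega)
  show placeitA (2 * slots.length + 2) slots idx ni d = _
  rw [placeitA_eq_findK slots ni hz (2 * slots.length + 2) idx d hd h0 h1]
  have hcov := findK_cover slots hz hd h0 h1
  have hle : (max (2 * ((slots.length : Int) - 1)) 1).toNat ≤ 2 * slots.length + 2 := by omega
  have hstab := findK_stable slots idx d (max (2 * ((slots.length : Int) - 1)) 1).toNat 0
    (2 * slots.length + 2) hle hcov
  show _ = (match (if idx < 0 then idx + (slots.length : Int) else idx) with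
    | start => match findK slots start d 0 (max (2 * ((slots.length : Int) - 1)) 1).toNat with
      | some pos => PySem.List.pySetD slots pos ni
      | none => slots)
  rw [hstart, hstab]

-- clause C0 of Pre_: slots[idx] is already empty — A writes it at once, B's loop hits it at k = 0
theorem immediate_eq (slots : List Int) (idx ni d : Int)
    (h0 : -(slots.length : Int) ≤ idx) (h1 : idx < (slots.length : Int))
    (hz : PySem.List.pyGet? slots idx = some 0) :
    placeit slots idx ni (some d) = placeit_alt slots idx ni (some d) := by
  have hPc := max_choice (2 * ((slots.length : Int) - 1)) (1 : Int)
  have hn1 : 1 ≤ slots.length := by omega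
  obtain ⟨c, hc⟩ : ∃ c, (max (2 * ((slots.length : Int) - 1)) 1).toNat = c + 1 :=
    ⟨(max (2 * ((slots.length : Int) - 1)) 1).toNat - 1, by omega⟩
  show placeitA (2 * slots.length + 1 + 1) slots idx ni d = _
  rw [placeitA_succ, hz]
  simp only [ne_eq, not_true_eq_false, if_false]
  by_cases hneg : idx < 0
  · have hstart : (if idx < 0 then idx + (slots.length : Int) else idx)
        = idx + (slots.length : Int) := if_pos hneg
    have hwrap := pyGet?_wrap slots idx h0 hneg
    have hpos : rpos (slots.length : Int) (idx + (slots.length : Int)) d 0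
        = idx + (slots.length : Int) := by
      rw [rpos_eq_rposM,
        show (idx + (slots.length : Int)) + d * ((0 : Nat) : Int)
          = idx + (slots.length : Int) by push_cast; ring]
      exact rposM_id (by omega) (by omega)
    show _ = (match (if idx < 0 then idx + (slots.length : Int) else idx) with
      | start => match findK slots start d 0 (max (2 * ((slots.length : Int) - 1)) 1).toNat with
        | some pos => PySem.List.pySetD slots pos ni
        | none => slots)
    rw [hstart, hc]
    show _ = (match findK slots (idx + (slots.length : Int)) d 0 (c+1) with
      | some pos => PySem.List.pySetD slots pos ni
      | none => slots)
    rw [findK_succ, hpos, ← hwrap, hz]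
    simp only [reduceIte]
    exact pySetD_wrap slots idx ni h0 hneg
  · have hstart : (if idx < 0 then idx + (slots.length : Int) else idx) = idx := if_neg hneg
    have hpos : rpos (slots.length : Int) idx d 0 = idx := by
      rw [rpos_eq_rposM, show idx + d * ((0 : Nat) : Int) = idx by push_cast; ring]
      exact rposM_id (by omega) h1
    show _ = (match (if idx < 0 then idx + (slots.length : Int) else idx) with
      | start => match findK slots start d 0 (max (2 * ((slots.length : Int) - 1)) 1).toNat with
        | some pos => PySem.List.pySetD slots pos ni
        | none => slots)
    rw [hstart, hc]
    show _ = (match findK slots idx d 0 (c+1) with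
      | some pos => PySem.List.pySetD slots pos ni
      | none => slots)
    rw [findK_succ, hpos, hz]
    simp only [reduceIte]

-- clause C2 of Pre_: from a negative idx with direction -1, A descends through the wrapped
-- positions start, start-1, …; it agrees with B as long as an empty slot occurs at or below start
theorem descend_eq (slots : List Int) (ni : Int) :
    ∀ (c₁ k c₂ : Nat) (start : Int), 0 ≤ start → start < (slots.length : Int) →
      (k : Int) ≤ start →
      (start - (k : Int)).toNat + 1 ≤ c₁ → (start - (k : Int)).toNat + 1 ≤ c₂ →
      (0 : Int) ∈ slots.take ((start - (k : Int)).toNat + 1) →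
      placeitA c₁ slots (start - (k : Int) - (slots.length : Int)) ni (-1) =
        (match findK slots start (-1) k c₂ with
         | some pos => PySem.List.pySetD slots pos ni
         | none => slots) := by
  intro c₁
  induction c₁ with
  | zero => intro k c₂ start _ _ _ hc₁ _ _; exact absurd hc₁ (by omega)
  | succ c₁ ih =>
    intro k c₂ start h0 h1 hk hc₁ hc₂ hz
    obtain ⟨c₂', rfl⟩ : ∃ c₂', c₂ = c₂' + 1 := ⟨c₂ - 1, by omega⟩
    have hp0 : 0 ≤ start - (k : Int) := by omega
    have hp1 : start - (k : Int) < (slots.length : Int) := by omega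
    have hpos : rpos (slots.length : Int) start (-1) k = start - (k : Int) := by
      rw [rpos_eq_rposM, show start + (-1) * (k : Int) = start - (k : Int) by ring]
      exact rposM_id hp0 hp1
    have hi0 : -(slots.length : Int) ≤ start - (k : Int) - (slots.length : Int) := by omega
    have hi1 : start - (k : Int) - (slots.length : Int) < 0 := by omega
    have hwrap := pyGet?_wrap slots (start - (k : Int) - (slots.length : Int)) hi0 hi1
    rw [show start - (k : Int) - (slots.length : Int) + (slots.length : Int)
      = start - (k : Int) by ring] at hwrap
    have hget : PySem.List.pyGet? slots (start - (k : Int))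
        = some slots[(start - (k : Int)).toNat] :=
      PySem.List.pyGet?_eq_some_getElem slots hp0 hp1
    rw [placeitA_succ, hwrap, hget, findK_succ, hpos, hget]
    by_cases hv : slots[(start - (k : Int)).toNat] = 0
    · simp only [hv, ne_eq, not_true_eq_false, if_false, reduceIte]
      have hw := pySetD_wrap slots (start - (k : Int) - (slots.length : Int)) ni hi0 hi1
      rw [show start - (k : Int) - (slots.length : Int) + (slots.length : Int)
        = start - (k : Int) by ring] at hw
      exact hw
    · simp only [ne_eq, hv, not_false_eq_true, if_true]
      -- the remaining empty slot sits strictly below start - k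
      have hz' : ∃ i < (start - (k : Int)).toNat, slots[i]? = some 0 := by
        obtain ⟨i, hi, hiz⟩ := (mem_take_iff slots _ 0).mp hz
        refine ⟨i, ?_, hiz⟩
        rcases Nat.lt_or_ge i (start - (k : Int)).toNat with h | h
        · exact h
        · exfalso
          have : i = (start - (k : Int)).toNat := by omega
          subst this
          rw [List.getElem?_eq_getElem (by omega)] at hiz
          exact hv (by injection hiz)
      obtain ⟨i, hilt, hiz⟩ := hz'
      have hks : (k : Int) + 1 ≤ start := by omega
      have hbounce : ¬ (start - (k : Int) - (slots.length : Int) + (-1) = -1 ∨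
          start - (k : Int) - (slots.length : Int) + (-1) = (slots.length : Int)) := by omega
      rw [if_neg hbounce,
        show start - (k : Int) - (slots.length : Int) + (-1)
          = start - ((k : Int) + 1) - (slots.length : Int) by ring]
      have := ih (k+1) c₂' start h0 h1 (by push_cast; omega) (by omega) (by omega)
        ((mem_take_iff slots _ 0).mpr ⟨i, by omega, hiz⟩)
      rw [show ((k+1 : Nat) : Int) = (k : Int) + 1 by push_cast; ring] at this
      exact this

-- C2 at the top level
theorem descend_top (slots : List Int) (idx ni : Int)
    (h0 : -(slots.length : Int) ≤ idx) (h1 : idx < 0)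
    (hz : (0 : Int) ∈ slots.take ((idx + (slots.length : Int) + 1).toNat)) :
    placeit slots idx ni (some (-1)) = placeit_alt slots idx ni (some (-1)) := by
  have hPc := max_choice (2 * ((slots.length : Int) - 1)) (1 : Int)
  have hn1 : 1 ≤ slots.length := by omega
  have hstart : (if idx < 0 then idx + (slots.length : Int) else idx)
      = idx + (slots.length : Int) := if_pos h1
  show placeitA (2 * slots.length + 2) slots idx ni (-1) = _
  show _ = (match (if idx < 0 then idx + (slots.length : Int) else idx) with
    | start => match findK slots start (-1) 0 (max (2 * ((slots.length : Int) - 1)) 1).toNat with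
      | some pos => PySem.List.pySetD slots pos ni
      | none => slots)
  rw [hstart]
  have := descend_eq slots ni (2 * slots.length + 2) 0
    (max (2 * ((slots.length : Int) - 1)) 1).toNat (idx + (slots.length : Int))
    (by omega) (by omega) (by push_cast; omega) (by push_cast; omega) (by push_cast; omega)
    (by rw [show (idx + (slots.length : Int) - ((0 : Nat) : Int)).toNat + 1
      = (idx + (slots.length : Int) + 1).toNat by push_cast; omega]; exact hz)
  rw [show idx + (slots.length : Int) - ((0 : Nat) : Int) - (slots.length : Int)
    = idx by push_cast; ring] at this
  exact this

-- clause C3 of Pre_: from a negative idx with direction 1, A ascends through the wrapped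
-- positions start, start+1, …, len-2; it agrees with B as long as an empty slot occurs there
theorem ascend_eq (slots : List Int) (ni : Int) :
    ∀ (c₁ k c₂ : Nat) (start : Int), 0 ≤ start →
      start + (k : Int) ≤ (slots.length : Int) - 2 →
      ((slots.length : Int) - 2 - (start + (k : Int))).toNat + 1 ≤ c₁ →
      ((slots.length : Int) - 2 - (start + (k : Int))).toNat + 1 ≤ c₂ →
      (0 : Int) ∈ (slots.take (slots.length - 1)).drop ((start + (k : Int)).toNat) →
      placeitA c₁ slots (start + (k : Int) - (slots.length : Int)) ni 1 =
        (match findK slots start 1 k c₂ with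
         | some pos => PySem.List.pySetD slots pos ni
         | none => slots) := by
  intro c₁
  induction c₁ with
  | zero => intro k c₂ start _ _ hc₁ _ _; exact absurd hc₁ (by omega)
  | succ c₁ ih =>
    intro k c₂ start h0 hk hc₁ hc₂ hz
    obtain ⟨c₂', rfl⟩ : ∃ c₂', c₂ = c₂' + 1 := ⟨c₂ - 1, by omega⟩
    have hp0 : 0 ≤ start + (k : Int) := by omega
    have hp1 : start + (k : Int) < (slots.length : Int) := by omega
    have hpos : rpos (slots.length : Int) start 1 k = start + (k : Int) := by
      rw [rpos_eq_rposM, show start + 1 * (k : Int) = start + (k : Int) by ring]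
      exact rposM_id hp0 hp1
    have hi0 : -(slots.length : Int) ≤ start + (k : Int) - (slots.length : Int) := by omega
    have hi1 : start + (k : Int) - (slots.length : Int) < 0 := by omega
    have hwrap := pyGet?_wrap slots (start + (k : Int) - (slots.length : Int)) hi0 hi1
    rw [show start + (k : Int) - (slots.length : Int) + (slots.length : Int)
      = start + (k : Int) by ring] at hwrap
    have hget : PySem.List.pyGet? slots (start + (k : Int))
        = some slots[(start + (k : Int)).toNat] :=
      PySem.List.pyGet?_eq_some_getElem slots hp0 hp1
    rw [placeitA_succ, hwrap, hget, findK_succ, hpos, hget]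
    by_cases hv : slots[(start + (k : Int)).toNat] = 0
    · simp only [hv, ne_eq, not_true_eq_false, if_false, reduceIte]
      have hw := pySetD_wrap slots (start + (k : Int) - (slots.length : Int)) ni hi0 hi1
      rw [show start + (k : Int) - (slots.length : Int) + (slots.length : Int)
        = start + (k : Int) by ring] at hw
      exact hw
    · simp only [ne_eq, hv, not_false_eq_true, if_true]
      -- the remaining empty slot sits strictly above start + k (and at most at len-2)
      have hz' : ∃ i, (start + (k : Int)).toNat < i ∧ i < slots.length - 1 ∧
          slots[i]? = some 0 := by
        obtain ⟨i, hji, him, hiz⟩ := (mem_drop_take_iff slots _ _ 0).mp hz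
        refine ⟨i, ?_, him, hiz⟩
        rcases Nat.lt_or_ge (start + (k : Int)).toNat i with h | h
        · exact h
        · exfalso
          have : i = (start + (k : Int)).toNat := by omega
          subst this
          rw [List.getElem?_eq_getElem (by omega)] at hiz
          exact hv (by injection hiz)
      obtain ⟨i, hilt, hile, hiz⟩ := hz'
      have hbounce : ¬ (start + (k : Int) - (slots.length : Int) + 1 = -1 ∨
          start + (k : Int) - (slots.length : Int) + 1 = (slots.length : Int)) := by omega
      rw [if_neg hbounce,
        show start + (k : Int) - (slots.length : Int) + 1
          = start + ((k : Int) + 1) - (slots.length : Int) by ring]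
      have := ih (k+1) c₂' start h0 (by push_cast; omega) (by push_cast; omega)
        (by push_cast; omega)
        ((mem_drop_take_iff slots _ _ 0).mpr ⟨i, by push_cast; omega, by omega, hiz⟩)
      rw [show ((k+1 : Nat) : Int) = (k : Int) + 1 by push_cast; ring] at this
      exact this

-- C3 at the top level
theorem ascend_top (slots : List Int) (idx ni : Int)
    (h0 : -(slots.length : Int) ≤ idx) (h1 : idx < 0)
    (hz : (0 : Int) ∈ (slots.take (slots.length - 1)).drop ((idx + (slots.length : Int)).toNat)) :
    placeit slots idx ni (some 1) = placeit_alt slots idx ni (some 1) := by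
  have hPc := max_choice (2 * ((slots.length : Int) - 1)) (1 : Int)
  obtain ⟨i, hji, him, hiz⟩ := (mem_drop_take_iff slots _ _ 0).mp hz
  have hstart : (if idx < 0 then idx + (slots.length : Int) else idx)
      = idx + (slots.length : Int) := if_pos h1
  show placeitA (2 * slots.length + 2) slots idx ni 1 = _
  show _ = (match (if idx < 0 then idx + (slots.length : Int) else idx) with
    | start => match findK slots start 1 0 (max (2 * ((slots.length : Int) - 1)) 1).toNat with
      | some pos => PySem.List.pySetD slots pos ni
      | none => slots)
  rw [hstart]
  have := ascend_eq slots ni (2 * slots.length + 2) 0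
    (max (2 * ((slots.length : Int) - 1)) 1).toNat (idx + (slots.length : Int))
    (by omega) (by push_cast; omega) (by push_cast; omega) (by push_cast; omega)
    (by rw [show ((idx + (slots.length : Int) + ((0 : Nat) : Int))).toNat
      = (idx + (slots.length : Int)).toNat by push_cast; omega]; exact hz)
  rw [show idx + (slots.length : Int) + ((0 : Nat) : Int) - (slots.length : Int)
    = idx by push_cast; ring] at this
  exact this

-- ===== VERDICT (by name: the statement is the Claim_ definition above) =====
theorem placeit_spec : Claim_equal_placeit := by
  intro slots idx ni direction _ hpre
  unfold Spec_placeit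
  rcases hpre with ⟨hd, h0, h1, hz⟩ | ⟨hd, h0, h1, hz⟩ | ⟨hd, h0, h1, hz⟩ | ⟨hd, h0, h1, hz⟩
  · obtain ⟨d, rfl⟩ := Option.ne_none_iff_exists'.mp hd
    exact immediate_eq slots idx ni d h0 h1 hz
  · rcases hd with rfl | rfl
    · exact main_eq slots idx ni 1 (Or.inl rfl) h0 h1 hz
    · exact main_eq slots idx ni (-1) (Or.inr rfl) h0 h1 hz
  · subst hd
    exact descend_top slots idx ni h0 h1 hz
  · subst hd
    exact ascend_top slots idx ni h0 h1 hz
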